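-- pv_equiv track=rewrite | github.com/snji-khjuria/InfoExtractor | RegExpPatternExtractionUtil.py | starPatternMerging
-- ===== SOURCE A (Python) =====
-- def starPatternMerging(pattern):
--     position = pattern.find('*')
--     if position==-1:
--         return pattern
--     output = pattern[:position]
--     while True:
--         nextPosition = pattern.find('*', position+1)
--         if nextPosition==-1:
--             break
--         if nextPosition-position>3:
--             output+=pattern[position:nextPosition]
--         position=nextPosition
--     output+=pattern[position:]
--     return output
-- ===== SOURCE B (Python) =====
-- def starPatternMerging(pattern):
--     parts = pattern.split('*')
--     if len(parts) == 1:
--         return pattern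
--     result = [parts[0]]
--     for p in parts[1:-1]:
--         if len(p) > 2:
--             result.append('*' + p)
--     result.append('*' + parts[-1])
--     return ''.join(result)
-- ===== Notes on version B (the rewrite author's own statement) =====
-- stated objective: simpler
-- what changed: Replaces A's manual find()-based index scanning with a single split on the star character followed by one filtering pass over the interior segments, joining at the end.
import Mathlib
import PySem

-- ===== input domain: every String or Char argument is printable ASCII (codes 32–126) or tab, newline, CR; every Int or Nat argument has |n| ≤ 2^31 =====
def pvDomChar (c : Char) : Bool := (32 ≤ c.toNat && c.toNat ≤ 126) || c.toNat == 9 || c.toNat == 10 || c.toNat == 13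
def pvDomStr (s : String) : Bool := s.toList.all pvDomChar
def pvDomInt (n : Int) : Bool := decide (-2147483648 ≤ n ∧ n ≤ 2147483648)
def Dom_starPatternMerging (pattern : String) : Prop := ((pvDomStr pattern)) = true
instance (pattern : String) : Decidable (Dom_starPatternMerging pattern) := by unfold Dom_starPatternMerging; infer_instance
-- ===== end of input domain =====

-- ===== PORT A =====
-- B replaces A's find-based index scanning with split('*')-then-filter (objective: simpler).
-- Port of A: the while-True loop becomes pvALoop, recursing on the strictly increasing
-- star position (a proof argument keeps the position in range; it adds no computation).
def pvALoop (s : List Char) (position : Nat) (h : position < s.length) (output : List Char) :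
    Nat × List Char :=
  let nextPosition := PySem.Chars.findFrom s ['*'] ((position + 1 : Nat) : Int) none
  if hn : nextPosition = -1 then (position, output)
  else
    have hspec := PySem.Chars.findFrom_natCast_spec s ['*'] (position + 1) (by omega) hn
    have hlt : nextPosition.toNat < s.length := by
      rcases hspec.2.1 with ⟨t, ht⟩
      have : (List.drop nextPosition.toNat s).length = 1 + t.length := by
        rw [← ht]; simp [Nat.add_comm]
      have hle := List.length_drop (l := s) (i := nextPosition.toNat)
      omega
    have hgt : position < nextPosition.toNat := by
      have h1 := hspec.1
      omega
    let output2 := if nextPosition - (position : Int) > 3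
      then output ++ PySem.List.slice s (some ((position : Nat) : Int)) (some nextPosition)
      else output
    pvALoop s nextPosition.toNat hlt output2
termination_by s.length - position
decreasing_by omega

def starPatternMerging (pattern : String) : String :=
  let s := pattern.toList
  let position := PySem.Chars.find s ['*']
  if hp : position = -1 then pattern
  else
    have h0 : position.toNat < s.length := by
      have hnn : 0 ≤ position := by
        have := PySem.Chars.neg_one_le_find s ['*']
        omega
      rcases (PySem.Chars.find_spec (s := s) (sub := ['*']) hnn).1 with ⟨t, ht⟩
      have : (List.drop position.toNat s).length = 1 + t.length := by
        rw [← ht]; simp [Nat.add_comm]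
      have hle := List.length_drop (l := s) (i := position.toNat)
      omega
    let output := PySem.List.slice s none (some position)
    let r := pvALoop s position.toNat h0 output
    String.ofList (r.2 ++ PySem.List.slice s (some ((r.1 : Nat) : Int)) none)

-- ===== PORT B =====
-- Port of Source B: split on '*', keep interior parts longer than 2, last part unconditionally, join.
-- parts is never [] (split always yields at least one part), so the defaults of headD/getD are never used.
def starPatternMerging_alt (pattern : String) : String :=
  let parts := PySem.Chars.splitOn pattern.toList ['*']
  if parts.length = 1 then pattern
  else
    let result := (PySem.List.slice parts (some 1) (some (-1))).foldl
      (fun acc p => if decide (2 < p.length) then acc ++ ['*' :: p] else acc)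
      [parts.headD []]
    String.ofList (result ++ ['*' :: (parts.getLast?.getD [])]).flatten

-- ===== PRECONDITION & SPEC =====
def Spec_starPatternMerging (pattern : String) (out : String) : Prop := out = starPatternMerging_alt pattern
instance (pattern : String) (out : String) : Decidable (Spec_starPatternMerging pattern out) := by unfold Spec_starPatternMerging; infer_instance

-- ===== CLAIM (what is proved, stated in full; the proofs are below) =====
def Claim_equal_starPatternMerging : Prop := ∀ (pattern : String), Dom_starPatternMerging pattern → Spec_starPatternMerging pattern (starPatternMerging pattern)

-- ===== LEMMAS AND PROOFS =====

-- Proof-side reference functions: pvSplit = split on '*'; pvMergeTail u = what A's loop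
-- contributes from the first star onward, where u is the text after that star.
def pvSplit (u : List Char) : List (List Char) :=
  if _h : '*' ∈ u then
    u.takeWhile (· != '*') :: pvSplit ((u.dropWhile (· != '*')).tail)
  else [u]
termination_by u.length
decreasing_by
  have hne : u.dropWhile (· != '*') ≠ [] := by
    intro hnil
    have := List.dropWhile_eq_nil_iff.mp hnil '*' _h
    simp at this
  have h1 := List.length_dropWhile_le (p := (· != '*')) (l := u)
  have h2 : (u.dropWhile (· != '*')).length ≠ 0 := by
    simpa [List.length_eq_zero_iff] using hne
  simp only [List.length_tail]
  omega

def pvMergeTail (u : List Char) : List Char :=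
  if _h : '*' ∈ u then
    (if 2 < (u.takeWhile (· != '*')).length then '*' :: u.takeWhile (· != '*') else []) ++
      pvMergeTail ((u.dropWhile (· != '*')).tail)
  else '*' :: u
termination_by u.length
decreasing_by
  have hne : u.dropWhile (· != '*') ≠ [] := by
    intro hnil
    have := List.dropWhile_eq_nil_iff.mp hnil '*' _h
    simp at this
  have h1 := List.length_dropWhile_le (p := (· != '*')) (l := u)
  have h2 : (u.dropWhile (· != '*')).length ≠ 0 := by
    simpa [List.length_eq_zero_iff] using hne
  simp only [List.length_tail]
  omega

lemma pvSplit_ne_nil (u : List Char) : pvSplit u ≠ [] := by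
  rw [pvSplit]
  split <;> simp

-- dropWhile (· != '*') of a list containing '*' is '*' :: its tail
lemma dropWhile_star (u : List Char) (h : '*' ∈ u) :
    u.dropWhile (· != '*') = '*' :: (u.dropWhile (· != '*')).tail := by
  have hne : u.dropWhile (· != '*') ≠ [] := by
    intro hnil
    have := List.dropWhile_eq_nil_iff.mp hnil '*' h
    simp at this
  have hhead := List.head_dropWhile_not (· != '*') hne
  have : (u.dropWhile (· != '*')).head hne = '*' := by
    simpa using hhead
  conv_lhs => rw [← List.cons_head_tail hne, this]

-- the characterisation of PySem.Chars.splitOn.go for sep = ['*']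
lemma go_spec (fuel : Nat) (u cur : List Char) (acc : List (List Char)) (hf : u.length < fuel) :
    PySem.Chars.splitOn.go ['*'] fuel u cur acc =
      acc.reverse ++ (pvSplit u).modifyHead (cur.reverse ++ ·) := by
  induction fuel generalizing u cur acc with
  | zero => omega
  | succ f ih =>
    cases u with
    | nil =>
      rw [PySem.Chars.splitOn.go]
      · rw [pvSplit]; simp
      · omega
    | cons c rest =>
      rw [PySem.Chars.splitOn.go]
      by_cases hc : c = '*'
      · subst hc
        simp only [List.isPrefixOf, BEq.rfl, Bool.true_and, if_true,
          List.length_cons, List.length_nil, List.drop_succ_cons, List.drop_zero]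
        rw [ih rest [] _ (by simp at hf; omega)]
        conv_rhs => rw [pvSplit]
        simp only [List.mem_cons, true_or, dif_pos]
        have h1 : List.takeWhile (· != '*') ('*' :: rest) = [] := by simp [List.takeWhile]
        have h2 : List.dropWhile (· != '*') ('*' :: rest) = '*' :: rest := by simp [List.dropWhile]
        rw [h1, h2]
        simp only [List.tail_cons, List.reverse_cons, List.reverse_nil, List.nil_append]
        rcases pvSplit rest with _ | ⟨a, q⟩ <;> simp
      · have hpre : List.isPrefixOf ['*'] (c :: rest) = false := by
          simp [List.isPrefixOf]; exact fun h => absurd h.symm hc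
        rw [hpre]
        simp only [Bool.false_eq_true, if_false]
        rw [ih rest (c :: cur) _ (by simp at hf; omega)]
        conv_rhs => rw [pvSplit]
        by_cases hm : '*' ∈ rest
        · have hmem : '*' ∈ c :: rest := by simp [hm]
          rw [dif_pos hmem]
          have h1 : List.takeWhile (· != '*') (c :: rest) = c :: List.takeWhile (· != '*') rest := by
            rw [List.takeWhile_cons]; simp [hc]
          have h2 : List.dropWhile (· != '*') (c :: rest) = List.dropWhile (· != '*') rest := by
            rw [List.dropWhile_cons]; simp [hc]
          rw [h1, h2]
          conv_lhs => rw [pvSplit]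
          rw [dif_pos hm]
          simp
        · have hmem : '*' ∉ c :: rest := by simp [hm]; exact fun h => absurd h.symm hc
          rw [dif_neg hmem]
          conv_lhs => rw [pvSplit]
          rw [dif_neg hm]
          simp

lemma splitOn_eq_pvSplit (u : List Char) : PySem.Chars.splitOn u ['*'] = pvSplit u := by
  rw [PySem.Chars.splitOn, go_spec (u.length + 1) u [] [] (by omega)]
  rcases pvSplit u with _ | ⟨a, q⟩ <;> simp

-- length of takeWhile from find's minimality spec
lemma takeWhile_len_of_first (s : List Char) (r : Nat)
    (hpre : ['*'] <+: s.drop r) (hmin : ∀ i < r, ¬ ['*'] <+: s.drop i) :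
    (s.takeWhile (· != '*')).length = r := by
  induction s generalizing r with
  | nil => simp at hpre
  | cons c t ih =>
    cases r with
    | zero =>
      rcases hpre with ⟨w, hw⟩
      simp at hw
      rw [List.takeWhile_cons]
      simp [← hw.1]
    | succ r =>
      have hc : c ≠ '*' := by
        intro hcc
        exact hmin 0 (by omega) (by subst hcc; exact ⟨t, rfl⟩)
      rw [List.takeWhile_cons]
      simp only [hc, ne_eq, bne_iff_ne, not_false_iff, if_pos, List.length_cons]
      have := ih (r := r) (by simpa using hpre) (fun i hi => by
        have := hmin (i + 1) (by omega)
        simpa using this)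
      omega

lemma find_of_mem (s : List Char) (h : '*' ∈ s) :
    PySem.Chars.find s ['*'] = ((s.takeWhile (· != '*')).length : Int) := by
  have hnn : 0 ≤ PySem.Chars.find s ['*'] := by
    rw [PySem.Chars.find_nonneg_iff, List.singleton_infix_iff]
    exact h
  have hspec := PySem.Chars.find_spec (s := s) (sub := ['*']) hnn
  have := takeWhile_len_of_first s (PySem.Chars.find s ['*']).toNat hspec.1 hspec.2
  omega

lemma find_of_not_mem (s : List Char) (h : '*' ∉ s) :
    PySem.Chars.find s ['*'] = -1 := by
  rw [PySem.Chars.find_eq_neg_one_iff]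
  rw [List.singleton_infix_iff]
  exact h

-- A's loop, characterised by pvMergeTail
lemma pvALoop_congr (s : List Char) {n n' : Nat} (h : n < s.length) (h' : n' < s.length)
    {o o' : List Char} (hn : n = n') (ho : o = o') :
    pvALoop s n h o = pvALoop s n' h' o' := by
  subst hn; subst ho; rfl

-- A's loop, characterised by pvMergeTail
lemma pvALoop_spec (s : List Char) (u : List Char) (position : Nat)
    (hp : position < s.length) (out : List Char)
    (hdrop : s.drop position = '*' :: u) :
    (pvALoop s position hp out).2 ++ s.drop (pvALoop s position hp out).1 =
      out ++ pvMergeTail u := by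
  have hu : s.drop (position + 1) = u := by
    rw [← List.tail_drop, hdrop, List.tail_cons]
  rw [pvALoop]
  by_cases hm : '*' ∈ u
  · -- another star exists after this one
    set a := u.takeWhile (· != '*') with ha
    set v := (u.dropWhile (· != '*')).tail with hv
    have hNF : PySem.Chars.findFrom s ['*'] ((position + 1 : Nat) : Int) none
        = ((position + 1 + a.length : Nat) : Int) := by
      rw [PySem.Chars.findFrom_natCast s ['*'] (position + 1) (by omega), hu, find_of_mem u hm,
        ← ha, if_neg (by omega)]
      push_cast
      ring
    have htake : u.take a.length = a := by
      exact (List.prefix_iff_eq_take.mp (List.takeWhile_prefix _)).symm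
    have hdw : u.dropWhile (· != '*') = '*' :: v := dropWhile_star u hm
    have hdropnext : s.drop (position + 1 + a.length) = '*' :: v := by
      have h1 : List.drop (position + 1 + a.length) s = List.drop a.length u := by
        rw [← hu, List.drop_drop]
      rw [h1]
      have h2 : List.drop a.length u = u.dropWhile (· != '*') := by
        conv_lhs => rw [← List.takeWhile_append_dropWhile (p := (· != '*')) (l := u)]
        rw [List.drop_left' (by rw [ha])]
      rw [h2, hdw]
    have hplt : position + 1 + a.length < s.length := by
      have hld := List.length_drop (l := s) (i := position + 1 + a.length)
      rw [hdropnext] at hld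
      have h2 : position + 1 + a.length ≤ s.length := by
        by_contra hcon
        have hnil : List.drop (position + 1 + a.length) s = [] := by
          apply List.drop_eq_nil_of_le; omega
        rw [hdropnext] at hnil; simp at hnil
      simp at hld; omega
    split
    · next hn => rw [hNF] at hn; omega
    · next hn =>
      dsimp only
      rw [pvALoop_congr s _ hplt (by rw [hNF]; omega)
        (show _ = (if ((position + 1 + a.length : Nat) : Int) - (position : Int) > 3
          then out ++ PySem.List.slice s (some ((position : Nat) : Int)) (some ((position + 1 + a.length : Nat) : Int))
          else out) by rw [hNF])]
      have hslice : PySem.List.slice s (some ((position : Nat) : Int)) (some ((position + 1 + a.length : Nat) : Int)) = '*' :: a := by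
        rw [PySem.List.slice_natCast]
        have h3 : position + 1 + a.length - position = 1 + a.length := by omega
        rw [h3, hdrop, show 1 + a.length = a.length + 1 by omega, List.take_succ_cons, htake]
      have hg := List.length_dropWhile_le (p := (· != '*')) (l := u)
      have hupos : 0 < u.length := List.length_pos_of_mem hm
      have hvlen : v.length < u.length := by
        have h1 := List.length_dropWhile_le (p := (· != '*')) (l := u)
        rw [hdw] at h1
        simp only [hv, List.length_cons] at *
        omega
      rw [pvALoop_spec s v (position + 1 + a.length) hplt _ hdropnext]
      conv_rhs => rw [pvMergeTail, dif_pos hm]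
      rw [hslice]
      by_cases hc : 2 < a.length
      · rw [if_pos (by push_cast; omega), if_pos hc]
        simp [← ha, ← hv]
      · rw [if_neg (by push_cast; omega), if_neg hc]
        simp [← hv]
  · -- no further star: the loop stops here
    have hNF : PySem.Chars.findFrom s ['*'] ((position + 1 : Nat) : Int) none = -1 := by
      rw [PySem.Chars.findFrom_natCast s ['*'] (position + 1) (by omega), hu,
        find_of_not_mem u hm]
      rw [if_pos rfl]
    split
    · dsimp only
      rw [hdrop]
      conv_rhs => rw [pvMergeTail, dif_neg hm]
    · next hn => exact absurd hNF hn
termination_by u.length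
decreasing_by simp_wf; omega

-- pvMergeTail in terms of pvSplit (what B computes on the tail)
lemma mergeTail_eq (u : List Char) :
    pvMergeTail u =
      (List.map (fun p => '*' :: p) (List.filter (fun p => decide (2 < p.length)) (pvSplit u).dropLast)).flatten
        ++ '*' :: ((pvSplit u).getLast?.getD []) := by
  rw [pvMergeTail, pvSplit]
  by_cases hm : '*' ∈ u
  · rw [dif_pos hm, dif_pos hm]
    set v := (u.dropWhile (· != '*')).tail with hv
    have hq := pvSplit_ne_nil v
    have hvlen : v.length < u.length := by
      have hne : u.dropWhile (· != '*') ≠ [] := by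
        intro hnil
        have := List.dropWhile_eq_nil_iff.mp hnil '*' hm
        simp at this
      have h1 := List.length_dropWhile_le (p := (· != '*')) (l := u)
      have h2 : (u.dropWhile (· != '*')).length ≠ 0 := by
        simpa [List.length_eq_zero_iff] using hne
      simp only [hv, List.length_tail]
      omega
    have hgle := List.length_dropWhile_le (p := (· != '*')) (l := u)
    have hupos : 0 < u.length := List.length_pos_of_mem hm
    rw [List.dropLast_cons_of_ne_nil hq]
    have hlast : ((u.takeWhile (· != '*') :: pvSplit v).getLast?.getD []) = ((pvSplit v).getLast?.getD []) := by
      rcases hpv : pvSplit v with _ | ⟨b, t⟩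
      · exact absurd hpv hq
      · simp [List.getLast?_cons]
    rw [hlast, mergeTail_eq v]
    by_cases hc : 2 < (u.takeWhile (· != '*')).length
    · rw [if_pos hc]
      simp [hc]
    · rw [if_neg hc]
      simp [hc]
  · rw [dif_neg hm, dif_neg hm]
    simp
termination_by u.length
decreasing_by simp_wf; omega

lemma slice_one_negone {α : Type} (xs : List α) :
    PySem.List.slice xs (some 1) (some (-1)) = xs.tail.dropLast := by
  cases xs with
  | nil => simp [PySem.List.slice, PySem.List.clampIdx]
  | cons x t =>
    simp only [PySem.List.slice, PySem.List.clampIdx]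
    norm_num
    rw [List.dropLast_eq_take]
    simp
    rw [if_neg (by omega)]
    omega

-- ===== VERDICT (by name: the statement is the Claim_ definition above) =====
-- B's computation, rewritten through pvSplit
lemma alt_eq (pattern : String) :
    starPatternMerging_alt pattern =
      if (pvSplit pattern.toList).length = 1 then pattern
      else String.ofList
        ((pvSplit pattern.toList).headD [] ++
          (List.map (fun p => '*' :: p)
            (List.filter (fun p => decide (2 < p.length)) (pvSplit pattern.toList).tail.dropLast)).flatten
          ++ '*' :: ((pvSplit pattern.toList).getLast?.getD [])) := by
  rw [starPatternMerging_alt]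
  simp only [splitOn_eq_pvSplit, slice_one_negone]
  rcases h : pvSplit pattern.toList with _ | ⟨a, q⟩
  · exact absurd h (pvSplit_ne_nil _)
  · split
    · rfl
    · rw [PySem.List.foldl_append_if (fun p => decide (2 < p.length)) (fun p => '*' :: p)]
      simp

theorem starPatternMerging_spec : Claim_equal_starPatternMerging := by
  intro pattern _hdom
  unfold Spec_starPatternMerging
  rw [alt_eq, starPatternMerging]
  dsimp only
  set s := pattern.toList with hs
  by_cases hm : '*' ∈ s
  · -- at least one star
    set a0 := s.takeWhile (· != '*') with ha0
    set v0 := (s.dropWhile (· != '*')).tail with hv0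
    have hfind : PySem.Chars.find s ['*'] = (a0.length : Int) := find_of_mem s hm
    have hdw : s.dropWhile (· != '*') = '*' :: v0 := dropWhile_star s hm
    have hsplit : pvSplit s = a0 :: pvSplit v0 := by
      rw [pvSplit, dif_pos hm]
    have hq := pvSplit_ne_nil v0
    have htake : s.take a0.length = a0 :=
      (List.prefix_iff_eq_take.mp (List.takeWhile_prefix _)).symm
    have hdropa0 : s.drop a0.length = '*' :: v0 := by
      conv_lhs => rw [← List.takeWhile_append_dropWhile (p := (· != '*')) (l := s)]
      rw [List.drop_left' (by rw [ha0]), hdw]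
    have ha0lt : a0.length < s.length := by
      have hld := List.length_drop (l := s) (i := a0.length)
      rw [hdropa0] at hld
      have h2 : a0.length ≤ s.length := by
        by_contra hcon
        have hnil : List.drop a0.length s = [] := List.drop_eq_nil_of_le (by omega)
        rw [hdropa0] at hnil; simp at hnil
      simp at hld; omega
    split
    · next hp => rw [hfind] at hp; omega
    · next hp =>
      rw [pvALoop_congr s _ ha0lt (by rw [hfind]; simp)
        (show _ = a0 by rw [hfind, PySem.List.slice_to_natCast, htake])]
      rw [PySem.List.slice_from_natCast]
      rw [pvALoop_spec s v0 a0.length ha0lt a0 hdropa0]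
      rw [hsplit]
      rw [if_neg (by simp [List.length_cons, hq])]
      rw [mergeTail_eq v0]
      have hlast : ((a0 :: pvSplit v0).getLast?.getD []) = ((pvSplit v0).getLast?.getD []) := by
        rcases hpv : pvSplit v0 with _ | ⟨b, t⟩
        · exact absurd hpv hq
        · simp [List.getLast?_cons]
      rw [hlast]
      simp
  · -- no star: both return the input unchanged
    have hfind : PySem.Chars.find s ['*'] = -1 := find_of_not_mem s hm
    have hsplit : pvSplit s = [s] := by rw [pvSplit, dif_neg hm]
    split
    · next hp => rw [if_pos (by rw [hsplit]; rfl)]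
    · next hp => exact absurd hfind hp
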